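-- pv_equiv track=rewrite | github.com/aLexzzz430/Cognitive-OS | core/orchestration/structured_answer.py | _crop_majority_bbox
-- ===== SOURCE A (Python) =====
-- from typing import Any, Callable, Dict, List, Optional, Sequence, Set, Tuple
--
-- Grid = List[List[int]]
--
-- def _identity(grid: Grid) -> Grid:
--     return [list(row) for row in grid]
--
-- def _majority_color(grid: Grid) -> int:
--     counts: Dict[int, int] = {}
--     for row in grid:
--         for cell in row:
--             counts[cell] = counts.get(cell, 0) + 1
--     return max(counts.items(), key=lambda item: (item[1], -item[0]))[0]
--
-- def _crop_majority_bbox(grid: Grid) -> Grid: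
--     bg = _majority_color(grid)
--     coords = [
--         (r_idx, c_idx)
--         for r_idx, row in enumerate(grid)
--         for c_idx, cell in enumerate(row)
--         if cell != bg
--     ]
--     if not coords:
--         return _identity(grid)
--     min_r = min(r for r, _ in coords)
--     max_r = max(r for r, _ in coords)
--     min_c = min(c for _, c in coords)
--     max_c = max(c for _, c in coords)
--     return [list(row[min_c : max_c + 1]) for row in grid[min_r : max_r + 1]]
-- ===== SOURCE B (Python) =====
-- from typing import Dict, List
--
-- Grid = List[List[int]]
--
-- def _identity(grid: Grid) -> Grid:
--     return [list(row) for row in grid]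
--
-- def _majority_color(grid: Grid) -> int:
--     counts: Dict[int, int] = {}
--     for row in grid:
--         for cell in row:
--             counts[cell] = counts.get(cell, 0) + 1
--     return max(counts.items(), key=lambda item: (item[1], -item[0]))[0]
--
-- def _crop_majority_bbox(grid: Grid) -> Grid:
--     # Border peeling: strip all-background rows from top and bottom, then
--     # all-background columns from left and right; no coordinates collected.
--     bg = _majority_color(grid)
--     rows = list(grid)
--     while rows and all(c == bg for c in rows[0]):
--         rows = rows[1:]
--     if not rows:
--         return _identity(grid)
--     while all(c == bg for c in rows[-1]):
--         rows = rows[:-1]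
--     left = 0
--     while all(left >= len(row) or row[left] == bg for row in rows):
--         left += 1
--     right = max(len(row) for row in rows) - 1
--     while all(right >= len(row) or row[right] == bg for row in rows):
--         right -= 1
--     return [list(row[left:right + 1]) for row in rows]
-- ===== Notes on version B (the rewrite author's own statement) =====
-- stated objective: alternative
-- what changed: B replaces A's coordinate-list-plus-four-min/max-scans with border peeling: it strips all-background rows from the top and bottom of the grid and then steps the left and right column bounds inward past all-background columns, never materialising any coordinates (no per-cell coords list and no Python-level min/max passes over it).
-- outside the precondition, e.g. on _crop_majority_bbox([]): A raises ValueError, B raises ValueError; on _crop_majority_bbox([[]]): A raises ValueError, B raises ValueError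
import Mathlib
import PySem

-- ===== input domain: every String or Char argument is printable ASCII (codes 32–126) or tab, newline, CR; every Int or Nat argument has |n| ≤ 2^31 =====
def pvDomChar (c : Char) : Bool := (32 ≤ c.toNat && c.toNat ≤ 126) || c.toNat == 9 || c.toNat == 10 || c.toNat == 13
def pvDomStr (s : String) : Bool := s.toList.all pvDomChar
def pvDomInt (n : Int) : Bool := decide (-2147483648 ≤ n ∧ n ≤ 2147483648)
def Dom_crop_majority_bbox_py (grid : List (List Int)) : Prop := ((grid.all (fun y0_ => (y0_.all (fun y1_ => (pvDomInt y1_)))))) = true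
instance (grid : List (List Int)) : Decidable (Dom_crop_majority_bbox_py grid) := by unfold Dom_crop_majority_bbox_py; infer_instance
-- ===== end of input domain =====

-- B replaces A's coordinate-collection + four min/max scans with border peeling: strip all-background
-- rows from top and bottom, then step the left/right column bounds inward past all-background columns
-- (objective: alternative algorithm, same O(cells) cost).

-- ===== PORT A =====
-- shared helper _identity (identical source in Source A and Source B)
def pvIdentity (grid : List (List Int)) : List (List Int) :=
  grid.map (fun row => row)

-- shared helper _majority_color (identical source in Source A and Source B);
-- on a grid with no cells Python raises ValueError (max of empty) — excluded by Pre_, the port returns 0 there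
def pvMajorityColor (grid : List (List Int)) : Int :=
  let counts : PySem.Dict Int Int :=
    grid.foldl (fun d row => row.foldl (fun d cell => d.insert cell (d.getD cell 0 + 1)) d) PySem.Dict.empty
  ((PySem.List.max2? counts.items (fun it => it.2) (fun it => -it.1)).map Prod.fst).getD 0

def crop_majority_bbox_py (grid : List (List Int)) : List (List Int) :=
  let bg := pvMajorityColor grid
  let coords : List (Int × Int) :=
    (PySem.List.enumerate grid).flatMap (fun p =>
      (PySem.List.enumerate p.2).filterMap (fun q =>
        if q.2 ≠ bg then some (p.1, q.1) else none))
  if coords = [] then pvIdentity grid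
  else
    let min_r := ((PySem.List.min? (coords.map Prod.fst) (fun x => x)).getD 0)
    let max_r := ((PySem.List.max? (coords.map Prod.fst) (fun x => x)).getD 0)
    let min_c := ((PySem.List.min? (coords.map Prod.snd) (fun x => x)).getD 0)
    let max_c := ((PySem.List.max? (coords.map Prod.snd) (fun x => x)).getD 0)
    (PySem.List.slice grid (some min_r) (some (max_r + 1))).map
      (fun row => PySem.List.slice row (some min_c) (some (max_c + 1)))

-- ===== PORT B =====
-- all(c == bg for c in row)
def pvRowBg (bg : Int) (row : List Int) : Bool := row.all (fun c => c == bg)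

-- while rows and all(c == bg for c in rows[0]): rows = rows[1:]
def pvDropTop (bg : Int) : List (List Int) → List (List Int)
  | [] => []
  | r :: rs => if pvRowBg bg r then pvDropTop bg rs else r :: rs

-- while all(c == bg for c in rows[-1]): rows = rows[:-1]  (recursion on the list; pops trailing bg rows)
def pvDropBot (bg : Int) : List (List Int) → List (List Int)
  | [] => []
  | r :: rs => match pvDropBot bg rs with
    | [] => if pvRowBg bg r then [] else [r]
    | l => r :: l

-- all(c >= len(row) or row[c] == bg for row in rows); the getD-0 branch is IndexError territory,
-- unreachable on the loop's trajectory (the bound stays inside the occupied columns)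
def pvColBg (bg : Int) (rows : List (List Int)) (c : Int) : Bool :=
  rows.all (fun row => decide ((row.length : Int) ≤ c) || ((PySem.List.pyGet? row c).getD 0 == bg))

-- while col_is_bg(left): left += 1   (fuel makes the loop total; Pre_ guarantees it is never exhausted)
def pvFindLeft (bg : Int) (rows : List (List Int)) : Nat → Int → Int
  | 0, c => c
  | fuel + 1, c => if pvColBg bg rows c then pvFindLeft bg rows fuel (c + 1) else c

-- while col_is_bg(right): right -= 1
def pvFindRight (bg : Int) (rows : List (List Int)) : Nat → Int → Int
  | 0, c => c
  | fuel + 1, c => if pvColBg bg rows c then pvFindRight bg rows fuel (c - 1) else c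

def crop_majority_bbox_py_alt (grid : List (List Int)) : List (List Int) :=
  let bg := pvMajorityColor grid
  let rows1 := pvDropTop bg grid
  if rows1 = [] then pvIdentity grid
  else
    let rows := pvDropBot bg rows1
    let fuel := rows.foldl (fun m row => max m row.length) 0 + 1
    let left := pvFindLeft bg rows fuel 0
    let maxlen := ((PySem.List.max? (rows.map (fun row => (row.length : Int))) (fun x => x)).getD 0)
    let right := pvFindRight bg rows fuel (maxlen - 1)
    rows.map (fun row => PySem.List.slice row (some left) (some (right + 1)))

-- ===== PRECONDITION & SPEC =====
-- Pre_ excludes grids with no cells at all (e.g. [] or [[], []]): there Python A raises ValueError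
-- (max() of the empty counts dict in _majority_color), and so does B.
def Pre_crop_majority_bbox_py (grid : List (List Int)) : Prop := grid.flatten ≠ []
instance (grid : List (List Int)) : Decidable (Pre_crop_majority_bbox_py grid) := by unfold Pre_crop_majority_bbox_py; infer_instance
def pvWitness_crop_majority_bbox_py : List (List Int) := [[1, 1], [1, 2]]

def Spec_crop_majority_bbox_py (grid : List (List Int)) (out : List (List Int)) : Prop := out = crop_majority_bbox_py_alt grid
instance (grid : List (List Int)) (out : List (List Int)) : Decidable (Spec_crop_majority_bbox_py grid out) := by unfold Spec_crop_majority_bbox_py; infer_instance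

-- ===== CLAIM (what is proved, stated in full; the proofs are below) =====
def Claim_equal_crop_majority_bbox_py : Prop := ∀ (grid : List (List Int)), Dom_crop_majority_bbox_py grid → Pre_crop_majority_bbox_py grid → Spec_crop_majority_bbox_py grid (crop_majority_bbox_py grid)

-- ===== LEMMAS AND PROOFS =====

-- A's coordinate list, named for the proofs
def pvCoords (bg : Int) (grid : List (List Int)) : List (Int × Int) :=
  (PySem.List.enumerate grid).flatMap (fun p =>
    (PySem.List.enumerate p.2).filterMap (fun q =>
      if q.2 ≠ bg then some (p.1, q.1) else none))

theorem pv_mem_coords (bg : Int) (grid : List (List Int)) (p : Int × Int) :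
    p ∈ pvCoords bg grid ↔
      ∃ (r k : Nat), ∃ (hr : r < grid.length), ∃ (hk : k < (grid[r]).length),
        p = ((r : Int), (k : Int)) ∧ grid[r][k] ≠ bg := by
  unfold pvCoords
  rw [List.mem_flatMap]
  constructor
  · rintro ⟨q, hq, hp⟩
    rw [PySem.List.mem_enumerate_iff] at hq
    obtain ⟨r, hr, rfl⟩ := hq
    rw [List.mem_filterMap] at hp
    obtain ⟨w, hw, hval⟩ := hp
    rw [PySem.List.mem_enumerate_iff] at hw
    obtain ⟨k, hk, rfl⟩ := hw
    by_cases hne : grid[r][k] ≠ bg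
    · simp only [ne_eq, hne, not_false_eq_true, if_true, Option.some_inj] at hval
      refine ⟨r, k, hr, hk, ?_, hne⟩
      simp [← hval]
    · simp [hne] at hval
  · rintro ⟨r, k, hr, hk, rfl, hne⟩
    refine ⟨((r : Int), grid[r]), ?_, ?_⟩
    · rw [PySem.List.mem_enumerate_iff]; exact ⟨r, hr, by simp⟩
    · rw [List.mem_filterMap]
      refine ⟨((k : Int), grid[r][k]), ?_, ?_⟩
      · rw [PySem.List.mem_enumerate_iff]; exact ⟨k, hk, by simp⟩
      · simp [hne]

theorem pv_rowBg_false_iff (bg : Int) (row : List Int) :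
    pvRowBg bg row = false ↔ ∃ (k : Nat), ∃ (hk : k < row.length), row[k] ≠ bg := by
  unfold pvRowBg
  rw [← Bool.not_eq_true, List.all_eq_true]
  constructor
  · intro h
    rw [not_forall] at h
    obtain ⟨x, hx⟩ := h
    rw [not_forall] at hx
    obtain ⟨hmx, hne⟩ := hx
    obtain ⟨k, hk, rfl⟩ := List.mem_iff_getElem.mp hmx
    exact ⟨k, hk, by simpa using hne⟩
  · rintro ⟨k, hk, hne⟩ h
    exact hne (by simpa using h row[k] (List.getElem_mem hk))

theorem pv_coords_eq_nil_iff (bg : Int) (grid : List (List Int)) :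
    pvCoords bg grid = [] ↔ ∀ row ∈ grid, pvRowBg bg row = true := by
  rw [List.eq_nil_iff_forall_not_mem]
  constructor
  · intro h row hrow
    by_contra hb
    rw [Bool.not_eq_true, pv_rowBg_false_iff] at hb
    obtain ⟨k, hk, hne⟩ := hb
    obtain ⟨r, hr, rfl⟩ := List.mem_iff_getElem.mp hrow
    exact h _ ((pv_mem_coords bg grid _).mpr ⟨r, k, hr, hk, rfl, hne⟩)
  · intro h p hp
    obtain ⟨r, k, hr, hk, -, hne⟩ := (pv_mem_coords bg grid p).mp hp
    have := h grid[r] (List.getElem_mem hr)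
    rw [pvRowBg, List.all_eq_true] at this
    exact hne (by simpa using this grid[r][k] (List.getElem_mem hk))

theorem pv_dropTop_eq_dropWhile (bg : Int) (l : List (List Int)) :
    pvDropTop bg l = l.dropWhile (pvRowBg bg) := by
  induction l with
  | nil => rfl
  | cons r rs ih =>
    by_cases h : pvRowBg bg r = true
    · simp [pvDropTop, h, ih]
    · simp [pvDropTop, h]

theorem pv_dropBot_eq (bg : Int) (l : List (List Int)) :
    pvDropBot bg l = (l.reverse.dropWhile (pvRowBg bg)).reverse := by
  induction l with
  | nil => rfl
  | cons r rs ih =>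
    simp only [pvDropBot, List.reverse_cons, List.dropWhile_append, ih]
    cases hd : rs.reverse.dropWhile (pvRowBg bg) with
    | nil =>
      simp only [List.isEmpty_nil, if_true, List.reverse_nil, List.dropWhile_cons,
        List.dropWhile_nil]
      by_cases hr : pvRowBg bg r = true <;> simp [hr]
    | cons a t =>
      simp

-- the fold computing the fuel is the running max of the row lengths
theorem pv_foldl_max_len (rows : List (List Int)) (a : Nat) :
    (∀ row ∈ rows, row.length ≤ rows.foldl (fun m row => max m row.length) a) ∧
      a ≤ rows.foldl (fun m row => max m row.length) a := by
  have h : rows.foldl (fun m row => max m row.length) a = (rows.map List.length).foldl max a := by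
    rw [List.foldl_map]
  rw [h]
  obtain ⟨h1, h2⟩ := PySem.List.le_foldl_max (rows.map List.length) a
  exact ⟨fun row hrow => h2 _ (List.mem_map_of_mem hrow), h1⟩

theorem pv_cast_foldl_max (t : List (List Int)) (a : Nat) :
    (t.map (fun row => (row.length : Int))).foldl max ((a : Nat) : Int)
      = ((t.foldl (fun m row => max m row.length) a : Nat) : Int) := by
  induction t generalizing a with
  | nil => rfl
  | cons x s ih =>
    simp only [List.map_cons, List.foldl_cons]
    rw [show max ((a : Nat) : Int) ((x.length : Nat) : Int) = ((max a x.length : Nat) : Int) by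
      simp [Nat.cast_max]]
    exact ih (max a x.length)

theorem pv_colBg_false_of (bg : Int) (rows : List (List Int)) (c : Nat)
    (h : ∃ row ∈ rows, ∃ (hc : c < row.length), row[c] ≠ bg) :
    pvColBg bg rows ((c : Nat) : Int) = false := by
  obtain ⟨row, hrow, hc, hne⟩ := h
  unfold pvColBg
  rw [← Bool.not_eq_true, List.all_eq_true]
  intro hall
  have hr := hall row hrow
  have hg : PySem.List.pyGet? row ((c : Nat) : Int) = some row[c] := by simp [hc]
  simp only [hg, Option.getD_some, Bool.or_eq_true, decide_eq_true_eq, beq_iff_eq] at hr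
  rcases hr with h1 | h2
  · omega
  · exact hne h2

theorem pv_colBg_true_of (bg : Int) (rows : List (List Int)) (c : Nat)
    (h : ∀ row ∈ rows, ∀ (hc : c < row.length), row[c] = bg) :
    pvColBg bg rows ((c : Nat) : Int) = true := by
  unfold pvColBg
  rw [List.all_eq_true]
  intro row hrow
  by_cases hc : c < row.length
  · have : PySem.List.pyGet? row ((c : Nat) : Int) = some row[c] := by
      simp [PySem.List.pyGet?_natCast, hc]
    simp [this, h row hrow hc]
  · simp; omega

theorem pv_findLeft_eq (bg : Int) (rows : List (List Int)) :
    ∀ (fuel : Nat) (c d : Int), c ≤ d → pvColBg bg rows d = false →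
      (∀ e, c ≤ e → e < d → pvColBg bg rows e = true) → (d - c).toNat < fuel →
      pvFindLeft bg rows fuel c = d := by
  intro fuel
  induction fuel with
  | zero => intro c d _ _ _ hf; omega
  | succ n ih =>
    intro c d hcd hd hmid hf
    rcases eq_or_lt_of_le hcd with rfl | hlt
    · simp [pvFindLeft, hd]
    · have hc : pvColBg bg rows c = true := hmid c le_rfl hlt
      simp only [pvFindLeft, hc, if_true]
      exact ih (c + 1) d (by omega) hd (fun e h1 h2 => hmid e (by omega) h2) (by omega)

theorem pv_findRight_eq (bg : Int) (rows : List (List Int)) :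
    ∀ (fuel : Nat) (c d : Int), d ≤ c → pvColBg bg rows d = false →
      (∀ e, d < e → e ≤ c → pvColBg bg rows e = true) → (c - d).toNat < fuel →
      pvFindRight bg rows fuel c = d := by
  intro fuel
  induction fuel with
  | zero => intro c d _ _ _ hf; omega
  | succ n ih =>
    intro c d hdc hd hmid hf
    rcases eq_or_lt_of_le hdc with rfl | hlt
    · simp [pvFindRight, hd]
    · have hc : pvColBg bg rows c = true := hmid c hlt le_rfl
      simp only [pvFindRight, hc, if_true]
      exact ih (c - 1) d (by omega) hd (fun e h1 h2 => hmid e h1 (by omega)) (by omega)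

-- every cell of a background row is bg
theorem pv_rowBg_cell (bg : Int) (row : List Int) (h : pvRowBg bg row = true)
    (k : Nat) (hk : k < row.length) : row[k] = bg := by
  rw [pvRowBg, List.all_eq_true] at h
  simpa using h row[k] (List.getElem_mem hk)

theorem pv_crop_eq (grid : List (List Int)) : crop_majority_bbox_py grid = crop_majority_bbox_py_alt grid := by
  simp only [crop_majority_bbox_py, crop_majority_bbox_py_alt]
  set bg := pvMajorityColor grid with hbgdef
  rw [pv_dropTop_eq_dropWhile]
  have hco : ((PySem.List.enumerate grid).flatMap (fun p =>
      (PySem.List.enumerate p.2).filterMap (fun q =>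
        if q.2 ≠ bg then some (p.1, q.1) else none))) = pvCoords bg grid := rfl
  rw [hco]
  by_cases hW : grid.dropWhile (pvRowBg bg) = []
  · rw [hW, if_pos rfl, if_pos (by
      exact (pv_coords_eq_nil_iff bg grid).mpr (List.dropWhile_eq_nil_iff.mp hW))]
  · -- non-trivial grid: some row has a non-background cell
    set l := grid.dropWhile (pvRowBg bg) with hldef
    set pre := grid.takeWhile (pvRowBg bg) with hpredef
    set rows := pvDropBot bg l with hrowsdef
    set suf := (l.reverse.takeWhile (pvRowBg bg)).reverse with hsufdef
    have hgrid : grid = pre ++ l := (List.takeWhile_append_dropWhile).symm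
    have hl : l = rows ++ suf := by
      calc l = l.reverse.reverse := l.reverse_reverse.symm
        _ = (l.reverse.takeWhile (pvRowBg bg) ++ l.reverse.dropWhile (pvRowBg bg)).reverse := by
              rw [List.takeWhile_append_dropWhile]
        _ = rows ++ suf := by rw [List.reverse_append, hrowsdef, pv_dropBot_eq]
    have hPpre : ∀ row ∈ pre, pvRowBg bg row = true := fun row h => List.mem_takeWhile_imp h
    have hPsuf : ∀ row ∈ suf, pvRowBg bg row = true := fun row h =>
      List.mem_takeWhile_imp (List.mem_reverse.mp h)
    have hrows_ne : rows ≠ [] := by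
      intro h
      have hm : l.head hW ∈ l := List.head_mem hW
      have hm2 : l.head hW ∈ rows ++ suf := by rw [← hl]; exact hm
      rw [h, List.nil_append] at hm2
      have := hPsuf _ hm2
      rw [List.head_dropWhile_not (pvRowBg bg) hW] at this
      exact Bool.false_ne_true this
    set t := pre.length with htdef
    set n := rows.length with hndef
    have hn0 : 0 < n := List.length_pos_iff.mpr hrows_ne
    have hlen_l : l.length = n + suf.length := by rw [hl]; simp [hndef]
    have hlen_g : grid.length = t + l.length := by rw [hgrid]; simp [htdef]
    -- element access through the decomposition grid = pre ++ (rows ++ suf)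
    have hF_l : ∀ (j : Nat) (hj : j < l.length), grid[t + j]'(by omega) = l[j] := by
      intro j hj
      rw [List.getElem_of_eq hgrid]
      rw [List.getElem_append_right (by omega)]
      congr 1
      omega
    have hF_rows : ∀ (i : Nat) (hi : i < n), l[i]'(by omega) = rows[i] := by
      intro i hi
      rw [List.getElem_of_eq hl]
      exact List.getElem_append_left hi
    have hF_grid_rows : ∀ (i : Nat) (hi : i < n), grid[t + i]'(by omega) = rows[i] := by
      intro i hi
      rw [hF_l i (by omega)]
      exact hF_rows i hi
    have hP_lt_t : ∀ (r : Nat) (hr : r < grid.length), r < t → pvRowBg bg (grid[r]) = true := by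
      intro r hr hrt
      rw [List.getElem_of_eq hgrid, List.getElem_append_left hrt]
      exact hPpre _ (List.getElem_mem hrt)
    have hP_ge : ∀ (r : Nat) (hr : r < grid.length), t + n ≤ r → pvRowBg bg (grid[r]) = true := by
      intro r hr hge
      have hj : r - t < l.length := by omega
      have h1 : pvRowBg bg (l[r - t]'hj) = true := by
        rw [List.getElem_of_eq hl, List.getElem_append_right (by omega)]
        exact hPsuf _ (List.getElem_mem (by omega))
      have h3 : grid[r]'hr = grid[t + (r - t)]'(by omega) := by congr 1; omega
      have h4 := h3.trans (hF_l (r - t) hj)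
      rw [h4]
      exact h1
    -- first and last retained rows are not all-background
    have hP_head : pvRowBg bg (rows[0]'hn0) = false := by
      have h0 : (0 : Nat) < l.length := by omega
      have h2 : rows[0]'hn0 = l.head hW := by
        rw [← hF_rows 0 hn0]
        exact (List.head_eq_getElem hW).symm
      rw [h2]
      exact List.head_dropWhile_not (pvRowBg bg) hW
    have hrev : rows.reverse = l.reverse.dropWhile (pvRowBg bg) := by
      rw [hrowsdef, pv_dropBot_eq, List.reverse_reverse]
    have hrev_ne : l.reverse.dropWhile (pvRowBg bg) ≠ [] := by
      rw [← hrev]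
      simpa using hrows_ne
    have hP_last : pvRowBg bg (rows[n - 1]'(by omega)) = false := by
      have h3 : rows.reverse ≠ [] := by simpa using hrows_ne
      have h2 : (l.reverse.dropWhile (pvRowBg bg)).head hrev_ne = rows[n - 1]'(by omega) := by
        rw [List.head_eq_getElem, List.getElem_of_eq hrev.symm, List.getElem_reverse]
        congr 1
      rw [← h2]
      exact List.head_dropWhile_not (pvRowBg bg) hrev_ne
    -- coordinates are exactly the non-background cells; coords is nonempty
    obtain ⟨k0, hk0, hk0ne⟩ := (pv_rowBg_false_iff bg _).mp hP_head
    have ht_lt : t < grid.length := by omega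
    have hcoord_mem : ∀ (i : Nat) (hi : i < n) (e : Nat) (he : e < (rows[i]).length),
        rows[i][e] ≠ bg → (((t + i : Nat) : Int), ((e : Nat) : Int)) ∈ pvCoords bg grid := by
      intro i hi e he hne
      have hge : grid[t + i]'(by omega) = rows[i] := hF_grid_rows i hi
      refine (pv_mem_coords bg grid _).mpr ⟨t + i, e, by omega, by rw [hge]; exact he, by push_cast; rfl, ?_⟩
      rw [List.getElem_of_eq hge]
      exact hne
    have hcne : pvCoords bg grid ≠ [] := by
      refine List.ne_nil_of_mem (hcoord_mem 0 hn0 k0 hk0 hk0ne)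
    -- any non-background cell lies in a retained row
    have hr_range : ∀ (r e : Nat) (hr : r < grid.length) (he : e < (grid[r]).length),
        grid[r][e] ≠ bg → t ≤ r ∧ r < t + n := by
      intro r e hr he hne
      constructor
      · by_contra hlt
        exact hne (pv_rowBg_cell bg _ (hP_lt_t r hr (by omega)) e he)
      · by_contra hge
        exact hne (pv_rowBg_cell bg _ (hP_ge r hr (by omega)) e he)
    -- the four extrema of A's coordinate list
    have hmapf_ne : (pvCoords bg grid).map Prod.fst ≠ [] := by simpa using hcne
    have hmaps_ne : (pvCoords bg grid).map Prod.snd ≠ [] := by simpa using hcne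
    have hminr : PySem.List.min? ((pvCoords bg grid).map Prod.fst) (fun x => x)
        = some ((t : Nat) : Int) := by
      cases h : PySem.List.min? ((pvCoords bg grid).map Prod.fst) (fun x => x) with
      | none => exact absurd ((PySem.List.min?_eq_none_iff _ _).mp h) hmapf_ne
      | some w =>
        congr 1
        obtain ⟨p, hp, hpw⟩ := List.mem_map.mp (PySem.List.min?_mem h)
        obtain ⟨r, k, hr, hk, rfl, hne⟩ := (pv_mem_coords bg grid p).mp hp
        have hrng := hr_range r k hr hk hne
        have hub := PySem.List.min?_isMin h
          (Prod.fst ((((t + 0 : Nat)) : Int), ((k0 : Nat) : Int)))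
          (List.mem_map_of_mem (hcoord_mem 0 hn0 k0 hk0 hk0ne))
        simp only at hub hpw
        subst hpw
        have h5 := hrng.1
        omega
    have hmaxr : PySem.List.max? ((pvCoords bg grid).map Prod.fst) (fun x => x)
        = some (((t + (n - 1) : Nat)) : Int) := by
      cases h : PySem.List.max? ((pvCoords bg grid).map Prod.fst) (fun x => x) with
      | none => exact absurd ((PySem.List.max?_eq_none_iff _ _).mp h) hmapf_ne
      | some w =>
        congr 1
        obtain ⟨p, hp, hpw⟩ := List.mem_map.mp (PySem.List.max?_mem h)
        obtain ⟨r, k, hr, hk, rfl, hne⟩ := (pv_mem_coords bg grid p).mp hp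
        have hrng := hr_range r k hr hk hne
        obtain ⟨kl, hkl, hklne⟩ := (pv_rowBg_false_iff bg _).mp hP_last
        have hlb := PySem.List.max?_isMax h
          (Prod.fst ((((t + (n - 1) : Nat)) : Int), ((kl : Nat) : Int)))
          (List.mem_map_of_mem (hcoord_mem (n - 1) (by omega) kl hkl hklne))
        simp only at hlb hpw
        subst hpw
        have h5 := hrng.2
        omega
    -- column extrema, as natural numbers with their witness and bound properties
    have hsnd : ∀ w ∈ (pvCoords bg grid).map Prod.snd, ∃ (k : Nat) (i : Nat) (hi : i < n),
        ∃ (hk : k < (rows[i]).length), w = ((k : Nat) : Int) ∧ rows[i][k] ≠ bg := by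
      intro w hw
      obtain ⟨p, hp, hpw⟩ := List.mem_map.mp hw
      obtain ⟨r, k, hr, hk, rfl, hne⟩ := (pv_mem_coords bg grid p).mp hp
      have hrng := hr_range r k hr hk hne
      have hge : grid[r] = rows[r - t]'(by omega) := by
        have h3 : grid[r]'hr = grid[t + (r - t)]'(by omega) := by congr 1; omega
        exact h3.trans (hF_grid_rows (r - t) (by omega))
      refine ⟨k, r - t, by omega, by rw [← hge]; exact hk, by simpa using hpw.symm, ?_⟩
      rw [← List.getElem_of_eq hge]
      exact hne
    have hsnd_all : ∀ (i : Nat) (hi : i < n) (e : Nat) (he : e < (rows[i]).length),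
        rows[i][e] ≠ bg → ((e : Nat) : Int) ∈ (pvCoords bg grid).map Prod.snd := by
      intro i hi e he hne
      exact List.mem_map.mpr ⟨_, hcoord_mem i hi e he hne, rfl⟩
    obtain ⟨wmin, hwmin⟩ : ∃ w, PySem.List.min? ((pvCoords bg grid).map Prod.snd) (fun x => x) = some w := by
      cases h : PySem.List.min? ((pvCoords bg grid).map Prod.snd) (fun x => x) with
      | none => exact absurd ((PySem.List.min?_eq_none_iff _ _).mp h) hmaps_ne
      | some w => exact ⟨w, rfl⟩
    obtain ⟨wmax, hwmax⟩ : ∃ w, PySem.List.max? ((pvCoords bg grid).map Prod.snd) (fun x => x) = some w := by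
      cases h : PySem.List.max? ((pvCoords bg grid).map Prod.snd) (fun x => x) with
      | none => exact absurd ((PySem.List.max?_eq_none_iff _ _).mp h) hmaps_ne
      | some w => exact ⟨w, rfl⟩
    obtain ⟨kmin, imin, himin, hkminlt, hwmineq, hkminne⟩ := hsnd wmin (PySem.List.min?_mem hwmin)
    obtain ⟨kmax, imax, himax, hkmaxlt, hwmaxeq, hkmaxne⟩ := hsnd wmax (PySem.List.max?_mem hwmax)
    subst hwmineq; subst hwmaxeq
    have hmin_le : ∀ (i : Nat) (hi : i < n) (e : Nat) (he : e < (rows[i]).length),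
        rows[i][e] ≠ bg → kmin ≤ e := by
      intro i hi e he hne
      have := PySem.List.min?_isMin hwmin _ (hsnd_all i hi e he hne)
      simp only at this
      exact_mod_cast this
    have hmax_ge : ∀ (i : Nat) (hi : i < n) (e : Nat) (he : e < (rows[i]).length),
        rows[i][e] ≠ bg → e ≤ kmax := by
      intro i hi e he hne
      have := PySem.List.max?_isMax hwmax _ (hsnd_all i hi e he hne)
      simp only at this
      exact_mod_cast this
    -- B's two column scans land exactly on those extrema
    set F := rows.foldl (fun m row => max m row.length) 0 with hFdef
    obtain ⟨hFub, -⟩ := pv_foldl_max_len rows 0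
    have hkminF : kmin < F := lt_of_lt_of_le hkminlt (hFub _ (List.getElem_mem himin))
    have hkmaxF : kmax < F := lt_of_lt_of_le hkmaxlt (hFub _ (List.getElem_mem himax))
    have hcol_true : ∀ (e : Int), 0 ≤ e → (∀ (en : Nat), e = (en : Int) →
        (∀ (i : Nat) (hi : i < n) (he : en < (rows[i]).length), rows[i][en] = bg)) →
        pvColBg bg rows e = true := by
      intro e he hprop
      obtain ⟨en, rfl⟩ : ∃ en : Nat, e = (en : Int) := ⟨e.toNat, by omega⟩
      refine pv_colBg_true_of bg rows en ?_
      intro row hrow hc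
      obtain ⟨i, hi, rfl⟩ := List.mem_iff_getElem.mp hrow
      exact hprop en rfl i hi hc
    have hleft : pvFindLeft bg rows (F + 1) 0 = ((kmin : Nat) : Int) := by
      refine pv_findLeft_eq bg rows (F + 1) 0 _ (by positivity) ?_ ?_ (by omega)
      · exact pv_colBg_false_of bg rows kmin ⟨_, List.getElem_mem himin, hkminlt, hkminne⟩
      · intro e h0e hekmin
        refine hcol_true e h0e ?_
        rintro en rfl i hi he
        by_contra hne
        have := hmin_le i hi en he hne
        omega
    have hmaxlen : (PySem.List.max? (rows.map (fun row => ((row.length : Nat) : Int))) (fun x => x)).getD 0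
        = ((F : Nat) : Int) := by
      cases hrw : rows with
      | nil => exact absurd hrw hrows_ne
      | cons rh rt =>
        rw [List.map_cons, PySem.List.max?_id_cons, Option.getD_some, pv_cast_foldl_max]
        congr 1
        rw [hFdef, hrw, List.foldl_cons]
        congr 1
    have hright : pvFindRight bg rows (F + 1) (((F : Nat) : Int) - 1) = ((kmax : Nat) : Int) := by
      refine pv_findRight_eq bg rows (F + 1) _ _ (by omega) ?_ ?_ (by omega)
      · exact pv_colBg_false_of bg rows kmax ⟨_, List.getElem_mem himax, hkmaxlt, hkmaxne⟩
      · intro e hkmaxe heF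
        refine hcol_true e (by omega) ?_
        rintro en rfl i hi he
        by_contra hne
        have := hmax_ge i hi en he hne
        omega
    -- assemble
    rw [if_neg hcne, if_neg hW, hminr, hmaxr, hwmin, hwmax, hmaxlen, hleft, hright]
    simp only [Option.getD_some]
    have hcast : (((t + (n - 1) : Nat)) : Int) + 1 = (((t + n) : Nat) : Int) := by push_cast; omega
    rw [hcast, PySem.List.slice_natCast]
    have hdrop : grid.drop t = l := by rw [hgrid, htdef]; exact List.drop_left
    have htake : l.take n = rows := by rw [hl, hndef]; exact List.take_left
    rw [show t + n - t = n by omega, hdrop, htake]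

-- ===== VERDICT (by name: the statement is the Claim_ definition above) =====
theorem crop_majority_bbox_py_spec : Claim_equal_crop_majority_bbox_py := by
  intro grid _ _
  unfold Spec_crop_majority_bbox_py
  exact pv_crop_eq grid
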